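-- pv_equiv track=rewrite | github.com/hyfg1024-dot/Quant_Agent | apps/trading/fast_engine.py | _build_order_book_10
-- ===== SOURCE A (Python) =====
-- from typing import Dict, List, Optional, Tuple
--
-- def _build_order_book_10(bids_5: List[Dict], asks_5: List[Dict]) -> Dict[str, List[Dict]]:
--     buy = []
--     sell = []
--
--     for i in range(10):
--         level = i + 1
--         if i < len(bids_5):
--             buy.append(bids_5[i])
--         else:
--             buy.append({"level": level, "price": None, "volume_lot": None})
--
--         if i < len(asks_5):
--             sell.append(asks_5[i])
--         else:
--             sell.append({"level": level, "price": None, "volume_lot": None})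
--
--     return {"buy": buy, "sell": sell}
-- ===== SOURCE B (Python) =====
-- def _build_order_book_10(bids_5, asks_5):
--     def go(bs, asks, level):
--         # recursively consume both lists head-by-head, padding once a side runs dry
--         if level > 10:
--             return [], []
--         head_b = bs[0] if bs else {"level": level, "price": None, "volume_lot": None}
--         head_s = asks[0] if asks else {"level": level, "price": None, "volume_lot": None}
--         tail_b, tail_s = go(bs[1:], asks[1:], level + 1)
--         return [head_b] + tail_b, [head_s] + tail_s
--
--     buy, sell = go(list(bids_5), list(asks_5), 1)
--     return {"buy": buy, "sell": sell}
-- ===== Notes on version B (the rewrite author's own statement) =====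
-- stated objective: alternative
-- what changed: Replaces A's indexed range(10) loop with two append accumulators by a recursive head/tail consumption of both lists at once that builds both sides front-to-back by cons, padding from the recursion level once a side is exhausted.
import Mathlib
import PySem

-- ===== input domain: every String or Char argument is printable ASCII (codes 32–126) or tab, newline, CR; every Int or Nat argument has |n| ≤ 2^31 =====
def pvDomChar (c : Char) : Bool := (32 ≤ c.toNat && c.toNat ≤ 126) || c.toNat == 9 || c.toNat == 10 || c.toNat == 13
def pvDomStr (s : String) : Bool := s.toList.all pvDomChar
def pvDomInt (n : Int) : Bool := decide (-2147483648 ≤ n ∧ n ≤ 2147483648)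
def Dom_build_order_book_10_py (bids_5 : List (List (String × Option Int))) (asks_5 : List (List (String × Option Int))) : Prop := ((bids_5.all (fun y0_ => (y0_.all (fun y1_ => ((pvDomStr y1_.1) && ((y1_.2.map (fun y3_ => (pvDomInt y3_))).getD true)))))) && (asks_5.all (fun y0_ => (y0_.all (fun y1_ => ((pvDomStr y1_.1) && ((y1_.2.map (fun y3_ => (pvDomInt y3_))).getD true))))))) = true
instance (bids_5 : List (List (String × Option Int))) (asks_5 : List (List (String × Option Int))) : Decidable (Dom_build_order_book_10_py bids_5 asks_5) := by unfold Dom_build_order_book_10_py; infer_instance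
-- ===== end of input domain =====

-- B replaces A's indexed range(10) loop by a 10-deep recursion that consumes both lists head-by-head and conses both sides front-to-back (objective: alternative).


-- ===== PORT A =====
-- the placeholder dict {"level": level, "price": None, "volume_lot": None}
def padRowA (level : Int) : List (String × Option Int) :=
  [("level", some level), ("price", none), ("volume_lot", none)]

-- literal port of A: one loop over range(10), appending either the real level or a placeholder to each side
def build_order_book_10_py (bids_5 : List (List (String × Option Int))) (asks_5 : List (List (String × Option Int))) : List (String × List (List (String × Option Int))) :=
  let res := (PySem.List.pyRange 0 10 1).foldl (fun bs (i : Int) =>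
    let level := i + 1
    -- bids_5[i] / asks_5[i] via pyGetD: exact here, the branch guarantees 0 ≤ i < length
    ((if i < (bids_5.length : Int) then bs.1 ++ [PySem.List.pyGetD bids_5 i []] else bs.1 ++ [padRowA level]),
     (if i < (asks_5.length : Int) then bs.2 ++ [PySem.List.pyGetD asks_5 i []] else bs.2 ++ [padRowA level]))) ([], [])
  [("buy", res.1), ("sell", res.2)]

-- ===== PORT B =====
def padRowB (level : Int) : List (String × Option Int) :=
  [("level", some level), ("price", none), ("volume_lot", none)]

-- B's inner 'go': Python recursion stops when level > 10; ported with the equivalent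
-- remaining-levels fuel n = 11 - level (so the call go(bs, asks, 1) becomes goB bs asks 10 1);
-- bs[0]/bs[1:] on an empty list never occur in a taken branch, so head/tail matching is exact.
def goB (bs asks : List (List (String × Option Int))) :
    Nat → Int → List (List (String × Option Int)) × List (List (String × Option Int))
  | 0, _ => ([], [])
  | n + 1, level =>
      let head_b := match bs with | [] => padRowB level | x :: _ => x
      let head_s := match asks with | [] => padRowB level | x :: _ => x
      let t := goB bs.tail asks.tail n (level + 1)
      (head_b :: t.1, head_s :: t.2)

def build_order_book_10_py_alt (bids_5 : List (List (String × Option Int))) (asks_5 : List (List (String × Option Int))) : List (String × List (List (String × Option Int))) :=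
  let bs := goB bids_5 asks_5 10 1
  [("buy", bs.1), ("sell", bs.2)]

-- ===== PRECONDITION & SPEC =====
def Spec_build_order_book_10_py (bids_5 : List (List (String × Option Int))) (asks_5 : List (List (String × Option Int))) (out : List (String × List (List (String × Option Int)))) : Prop := out = build_order_book_10_py_alt bids_5 asks_5
instance (bids_5 : List (List (String × Option Int))) (asks_5 : List (List (String × Option Int))) (out : List (String × List (List (String × Option Int)))) : Decidable (Spec_build_order_book_10_py bids_5 asks_5 out) := by unfold Spec_build_order_book_10_py; infer_instance

-- ===== CLAIM (what is proved, stated in full; the proofs are below) =====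
def Claim_equal_build_order_book_10_py : Prop := ∀ (bids_5 : List (List (String × Option Int))) (asks_5 : List (List (String × Option Int))), Dom_build_order_book_10_py bids_5 asks_5 → Spec_build_order_book_10_py bids_5 asks_5 (build_order_book_10_py bids_5 asks_5)

-- ===== LEMMAS AND PROOFS =====

-- one side of goB, as a standalone recursion (proof helper)
def sideGo (xs : List (List (String × Option Int))) : Nat → Int → List (List (String × Option Int))
  | 0, _ => []
  | n + 1, level =>
      (match xs with | [] => padRowB level | x :: _ => x) :: sideGo xs.tail n (level + 1)

-- goB computes its two sides independently
lemma goB_eq_pair (n : Nat) : ∀ (bs asks : List (List (String × Option Int))) (level : Int),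
    goB bs asks n level = (sideGo bs n level, sideGo asks n level) := by
  induction n with
  | zero => intro bs asks level; rfl
  | succ n ih =>
      intro bs asks level
      simp only [goB, sideGo, ih]

-- sideGo equals the index-based description of A's side
lemma sideGo_eq_map (n : Nat) : ∀ (xs : List (List (String × Option Int))) (level : Int),
    sideGo xs n level = (List.range n).map
      (fun k => if k < xs.length then xs.getD k [] else padRowB (level + (k : Int))) := by
  induction n with
  | zero => intro xs level; simp [sideGo]
  | succ n ih =>
      intro xs level
      rw [List.range_succ_eq_map, List.map_cons, List.map_map]
      cases xs with
      | nil =>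
          simp only [sideGo, List.tail_nil, ih, List.length_nil, Nat.not_lt_zero, if_false]
          congr 1
          · simp [padRowB]
          · refine List.map_congr_left (fun k _ => ?_)
            simp only [Function.comp_apply]
            congr 1
            push_cast
            ring
      | cons x xs' =>
          simp only [sideGo, List.tail_cons, ih, List.length_cons, Nat.zero_lt_succ, if_true,
            List.getD_cons_zero]
          congr 1
          refine List.map_congr_left (fun k _ => ?_)
          simp only [Function.comp_apply, Nat.succ_lt_succ_iff, List.getD_cons_succ]
          split
          · rfl
          · congr 1
            push_cast
            ring

-- A's loop on one side equals sideGo run with fuel 10 from level 1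
lemma sideA_eq_sideGo (xs : List (List (String × Option Int))) :
    List.foldl (fun acc (i : Int) =>
        if i < (xs.length : Int) then acc ++ [PySem.List.pyGetD xs i []] else acc ++ [padRowA (i + 1)])
      [] (PySem.List.pyRange 0 10 1) = sideGo xs 10 1 := by
  have hstep : (fun (acc : List (List (String × Option Int))) (i : Int) =>
      if i < (xs.length : Int) then acc ++ [PySem.List.pyGetD xs i []] else acc ++ [padRowA (i + 1)])
      = fun acc i => acc ++ [if i < (xs.length : Int) then PySem.List.pyGetD xs i [] else padRowA (i + 1)] := by
    funext acc i; split <;> rfl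
  have h10 : (10 : Int) = ((10 : Nat) : Int) := by norm_num
  rw [hstep, h10, PySem.List.pyRange_zero_nat, List.foldl_map,
    PySem.List.foldl_append_singleton_eq_map, List.nil_append, sideGo_eq_map]
  refine List.map_congr_left (fun k _ => ?_)
  rw [PySem.List.pyGetD_natCast]
  simp only [Nat.cast_lt]
  split
  · rfl
  · show padRowA ((k : Int) + 1) = padRowB (1 + (k : Int))
    unfold padRowA padRowB
    have : (k : Int) + 1 = 1 + (k : Int) := by ring
    rw [this]

-- ===== VERDICT (by name: the statement is the Claim_ definition above) =====
theorem build_order_book_10_py_spec : Claim_equal_build_order_book_10_py := by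
  intro bids_5 asks_5 _
  unfold Spec_build_order_book_10_py build_order_book_10_py build_order_book_10_py_alt
  rw [PySem.List.foldl_prod_mk
    (f := fun (acc : List (List (String × Option Int))) (i : Int) =>
      if i < (bids_5.length : Int) then acc ++ [PySem.List.pyGetD bids_5 i []] else acc ++ [padRowA (i + 1)])
    (g := fun (acc : List (List (String × Option Int))) (i : Int) =>
      if i < (asks_5.length : Int) then acc ++ [PySem.List.pyGetD asks_5 i []] else acc ++ [padRowA (i + 1)])]
  rw [sideA_eq_sideGo bids_5, sideA_eq_sideGo asks_5, goB_eq_pair]
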